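-- pv_equiv track=rewrite | github.com/daniel-reich/turbo-robot | vuSXW3iEnEQNZXjAP_13.py | create_square
-- ===== SOURCE A (Python) =====
-- def create_square(length):
--     r = []
--     if length == None or length < 1:
--         return ""
--     for i in range(length):
--         if i == 0 or i == length - 1:
--             r.append("#" * length)
--         else:
--             r.append("#" + " " * (length - 2) + "#")
--     return "\n".join(r)
-- ===== SOURCE B (Python) =====
-- def create_square(length):
--     if length is None or length < 1:
--         return ""
--     grid = [bytearray(b" " * length) for _ in range(length)]
--     for j in range(length):
--         grid[0][j] = 35
--         grid[length - 1][j] = 35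
--         grid[j][0] = 35
--         grid[j][length - 1] = 35
--     return "\n".join(row.decode("ascii") for row in grid)
-- ===== Notes on version B (the rewrite author's own statement) =====
-- stated objective: alternative
-- what changed: B builds an n-by-n grid of spaces and paints the four border lines cell by cell in a second pass, then joins the rows, instead of A's per-row branch emitting each row directly via string repetition.
import Mathlib
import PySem

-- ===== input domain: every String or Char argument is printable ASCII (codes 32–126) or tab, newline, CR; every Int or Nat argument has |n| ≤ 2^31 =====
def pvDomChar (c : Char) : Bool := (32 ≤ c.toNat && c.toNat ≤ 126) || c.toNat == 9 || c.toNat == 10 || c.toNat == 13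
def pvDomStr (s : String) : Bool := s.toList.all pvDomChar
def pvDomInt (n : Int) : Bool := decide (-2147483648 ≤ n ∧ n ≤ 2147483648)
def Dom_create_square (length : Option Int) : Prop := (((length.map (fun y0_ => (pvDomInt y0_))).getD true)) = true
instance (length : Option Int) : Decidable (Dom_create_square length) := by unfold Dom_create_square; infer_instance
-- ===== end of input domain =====

set_option maxHeartbeats 1000000


-- B builds an n×n grid of spaces and paints the border lines in a second pass, then joins rows; A emits each row directly. Equal outputs proved on all inputs.

-- ===== PORT A =====
-- '"#" * n' is ported as String.ofList (pyRepeat ['#'] n): exact Python str*int semantics.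
def create_square (length : Option Int) : String :=
  match length with
  | none => ""
  | some n =>
    if n < 1 then ""
    else
      let r := (PySem.List.pyRange 0 n 1).foldl (fun r i =>
        if i == 0 || i == n - 1 then
          r ++ [String.ofList (PySem.List.pyRepeat ['#'] n)]
        else
          r ++ [String.ofList (['#'] ++ PySem.List.pyRepeat [' '] (n - 2) ++ ['#'])]) []
      PySem.Str.join "\n" r

-- ===== PORT B =====
-- rows are bytearrays of ASCII bytes, modelled as List Char (32 = ' ', 35 = '#');
-- grid[i][a] = 35 is ported as read-row / set-cell / write-row; every index B uses is
-- provably in range (0 ≤ j < n, rows of size n), so .toNat / .set are exact here.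
def pvPaint (m : Nat) (g : List (List Char)) (t : Int) : List (List Char) :=
  let g1 := g.set 0 ((g.getD 0 []).set t.toNat '#')
  let g2 := g1.set (m - 1) ((g1.getD (m - 1) []).set t.toNat '#')
  let g3 := g2.set t.toNat ((g2.getD t.toNat []).set 0 '#')
  g3.set t.toNat ((g3.getD t.toNat []).set (m - 1) '#')

def create_square_alt (length : Option Int) : String :=
  match length with
  | none => ""
  | some n =>
    if n < 1 then ""
    else
      let m := n.toNat
      let grid := (PySem.List.pyRange 0 n 1).foldl (pvPaint m)
        (List.replicate m (List.replicate m ' '))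
      PySem.Str.join "\n" (grid.map (fun row => String.ofList row))

-- ===== PRECONDITION & SPEC =====
def Spec_create_square (length : Option Int) (out : String) : Prop := out = create_square_alt length
instance (length : Option Int) (out : String) : Decidable (Spec_create_square length out) := by unfold Spec_create_square; infer_instance

-- ===== CLAIM (what is proved, stated in full; the proofs are below) =====
def Claim_equal_create_square : Prop := ∀ (length : Option Int), Dom_create_square length → Spec_create_square length (create_square length)

-- ===== LEMMAS AND PROOFS =====

-- cell read used throughout the grid reasoning
def pvCell (g : List (List Char)) (j k : Nat) : Char := (g.getD j []).getD k ' '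

def pvShape (m : Nat) (g : List (List Char)) : Prop :=
  g.length = m ∧ ∀ r ∈ g, r.length = m

lemma pvShape_paint {m : Nat} {g : List (List Char)} (h : pvShape m g) (t : Int) :
    pvShape m (pvPaint m g t) := by
  obtain ⟨hl, hr⟩ := h
  unfold pvPaint
  refine ⟨by simp [hl], ?_⟩
  have key : ∀ (g' : List (List Char)), (∀ r ∈ g', r.length = m) →
      ∀ (i a : Nat), ∀ r ∈ g'.set i ((g'.getD i []).set a '#'), r.length = m := by
    intro g' hg' i a r hr'
    by_cases hi : i < g'.length
    · rcases List.mem_or_eq_of_mem_set hr' with h1 | h1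
      · exact hg' r h1
      · subst h1
        rw [List.length_set, List.getD_eq_getElem _ _ hi]
        exact hg' _ (List.getElem_mem hi)
    · rw [List.set_eq_of_length_le (Nat.le_of_not_lt hi)] at hr'
      exact hg' r hr'
  intro r hrmem
  exact key _ (key _ (key _ (key _ hr 0 t.toNat) (m-1) t.toNat) t.toNat 0) t.toNat (m-1) r hrmem

lemma pvCell_set (g : List (List Char)) (i a : Nat) (j k : Nat) :
    pvCell (g.set i ((g.getD i []).set a '#')) j k =
      if j = i ∧ i < g.length ∧ k = a ∧ a < (g.getD i []).length then '#'
      else pvCell g j k := by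
  unfold pvCell
  by_cases hij : j = i
  · subst hij
    by_cases hi : j < g.length
    · have hrow : (g.set j ((g.getD j []).set a '#')).getD j [] = (g.getD j []).set a '#' := by
        rw [List.getD_eq_getElem _ _ (by simpa using hi)]
        exact List.getElem_set_self _
      rw [hrow]
      by_cases hak : k = a
      · subst hak
        by_cases ha : k < (g.getD j []).length
        · rw [List.getD_eq_getElem _ _ (by simpa using ha)]
          rw [List.getElem_set_self, if_pos ⟨rfl, hi, rfl, ha⟩]
        · rw [List.set_eq_of_length_le (Nat.le_of_not_lt ha)]
          rw [if_neg (fun h => ha h.2.2.2)]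
      · have : ((g.getD j []).set a '#').getD k ' ' = (g.getD j []).getD k ' ' := by
          simp [List.getD_eq_getElem?_getD, List.getElem?_set_ne (fun h => hak h.symm)]
        rw [this, if_neg (fun h => hak h.2.2.1)]
    · rw [List.set_eq_of_length_le (Nat.le_of_not_lt hi)]
      rw [if_neg (fun h => hi h.2.1)]
  · have : (g.set i ((g.getD i []).set a '#')).getD j [] = g.getD j [] := by
      simp [List.getD_eq_getElem?_getD, List.getElem?_set_ne (fun h => hij h.symm)]
    rw [this, if_neg (fun h => hij h.1)]

lemma pvCell_paint {m : Nat} {g : List (List Char)} (hg : pvShape m g) (hm : 1 ≤ m)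
    (t : Int) (ht0 : 0 ≤ t) (htm : t < (m : Int)) (j k : Nat) (hj : j < m) (hk : k < m) :
    pvCell (pvPaint m g t) j k =
      if ((j = 0 ∨ j = m - 1) ∧ k = t.toNat) ∨ ((k = 0 ∨ k = m - 1) ∧ j = t.toNat) then '#'
      else pvCell g j k := by
  obtain ⟨hl, hr⟩ := hg
  have hrowD : ∀ (g' : List (List Char)), pvShape m g' → ∀ i, i < m → (g'.getD i []).length = m := by
    intro g' ⟨hl', hr'⟩ i hi
    rw [List.getD_eq_getElem _ _ (by omega)]
    exact hr' _ (List.getElem_mem (by omega))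
  have htn : t.toNat < m := by omega
  have s0 : pvShape m g := ⟨hl, hr⟩
  have s1 := pvShape_paint s0 t
  -- unfold the four sets step by step
  unfold pvPaint
  set g1 := g.set 0 ((g.getD 0 []).set t.toNat '#') with hg1
  have sh1 : pvShape m g1 := by
    constructor
    · simp [hg1, hl]
    · intro r hr1
      rcases List.mem_or_eq_of_mem_set hr1 with h | h
      · exact hr r h
      · subst h; rw [List.length_set]; exact hrowD g s0 0 hm
  set g2 := g1.set (m-1) ((g1.getD (m-1) []).set t.toNat '#') with hg2
  have sh2 : pvShape m g2 := by
    constructor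
    · simp [hg2, sh1.1]
    · intro r hr2
      rcases List.mem_or_eq_of_mem_set hr2 with h | h
      · exact sh1.2 r h
      · subst h; rw [List.length_set]; exact hrowD g1 sh1 (m-1) (by omega)
  set g3 := g2.set t.toNat ((g2.getD t.toNat []).set 0 '#') with hg3
  have sh3 : pvShape m g3 := by
    constructor
    · simp [hg3, sh2.1]
    · intro r hr3
      rcases List.mem_or_eq_of_mem_set hr3 with h | h
      · exact sh2.2 r h
      · subst h; rw [List.length_set]; exact hrowD g2 sh2 t.toNat htn
  rw [pvCell_set g3, pvCell_set g2, pvCell_set g1, pvCell_set g]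
  rw [hrowD g3 sh3 t.toNat htn, hrowD g2 sh2 t.toNat htn,
      hrowD g1 sh1 (m-1) (by omega), hrowD g s0 0 hm]
  rw [sh3.1, sh2.1, sh1.1, hl]
  split_ifs <;> first | rfl | omega

lemma pvCell_foldl {m : Nat} (hm : 1 ≤ m) (l : List Int)
    (hlb : ∀ t ∈ l, 0 ≤ t ∧ t < (m : Int)) (g : List (List Char)) (hg : pvShape m g)
    (j k : Nat) (hj : j < m) (hk : k < m) :
    pvCell (l.foldl (pvPaint m) g) j k =
      if ((j = 0 ∨ j = m - 1) ∧ (k : Int) ∈ l) ∨ ((k = 0 ∨ k = m - 1) ∧ (j : Int) ∈ l) then '#'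
      else pvCell g j k := by
  induction l generalizing g with
  | nil => simp
  | cons t ts ih =>
    have hb := hlb t (List.mem_cons_self)
    have hts : ∀ x ∈ ts, 0 ≤ x ∧ x < (m : Int) := fun x hx => hlb x (List.mem_cons_of_mem _ hx)
    rw [List.foldl_cons, ih hts _ (pvShape_paint hg t),
        pvCell_paint hg hm t hb.1 hb.2 j k hj hk]
    have e1 : (k = t.toNat) ↔ ((k : Int) = t) := by omega
    have e2 : (j = t.toNat) ↔ ((j : Int) = t) := by omega
    simp only [List.mem_cons, e1, e2]
    split_ifs <;> tauto

lemma pvShape_foldl {m : Nat} (l : List Int) (g : List (List Char)) (hg : pvShape m g) :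
    pvShape m (l.foldl (pvPaint m) g) := by
  induction l generalizing g with
  | nil => exact hg
  | cons t ts ih => exact ih _ (pvShape_paint hg t)

-- A's loop body with the branch pushed inside the append
lemma pvA_rows (n : Int) :
    (PySem.List.pyRange 0 n 1).foldl (fun r i =>
        if i == 0 || i == n - 1 then
          r ++ [String.ofList (PySem.List.pyRepeat ['#'] n)]
        else
          r ++ [String.ofList (['#'] ++ PySem.List.pyRepeat [' '] (n - 2) ++ ['#'])]) [] =
      (PySem.List.pyRange 0 n 1).map (fun i =>
        if i == 0 || i == n - 1 then String.ofList (PySem.List.pyRepeat ['#'] n)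
        else String.ofList (['#'] ++ PySem.List.pyRepeat [' '] (n - 2) ++ ['#'])) := by
  have : ∀ (l : List Int) (acc : List String),
      l.foldl (fun r i =>
        if i == 0 || i == n - 1 then
          r ++ [String.ofList (PySem.List.pyRepeat ['#'] n)]
        else
          r ++ [String.ofList (['#'] ++ PySem.List.pyRepeat [' '] (n - 2) ++ ['#'])]) acc =
      acc ++ l.map (fun i =>
        if i == 0 || i == n - 1 then String.ofList (PySem.List.pyRepeat ['#'] n)
        else String.ofList (['#'] ++ PySem.List.pyRepeat [' '] (n - 2) ++ ['#'])) := by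
    intro l
    induction l with
    | nil => simp
    | cons x xs ih =>
      intro acc
      simp only [List.foldl_cons, List.map_cons]
      rw [ih]
      split <;> simp
  simpa using this (PySem.List.pyRange 0 n 1) []

-- length of A's row j, for j in range
lemma pvA_row_len (n : Int) (hn : 1 ≤ n) (j : Nat) (hj : j < n.toNat) :
    (if ((j : Int) == 0 || (j : Int) == n - 1) = true then PySem.List.pyRepeat ['#'] n
     else ['#'] ++ PySem.List.pyRepeat [' '] (n - 2) ++ ['#']).length = n.toNat := by
  split_ifs with h
  · simp [PySem.List.pyRepeat_singleton]
  · simp only [beq_iff_eq, Bool.or_eq_true] at h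
    push_neg at h
    simp only [PySem.List.pyRepeat_singleton, List.length_append, List.length_cons,
      List.length_replicate, List.length_nil]
    omega

-- the k-th character of A's row j, for j, k in range
lemma pvA_row_char (n : Int) (hn : 1 ≤ n) (j k : Nat) (hj : j < n.toNat) (hk : k < n.toNat)
    (h : k < (if ((j : Int) == 0 || (j : Int) == n - 1) = true then PySem.List.pyRepeat ['#'] n
              else ['#'] ++ PySem.List.pyRepeat [' '] (n - 2) ++ ['#']).length) :
    (if ((j : Int) == 0 || (j : Int) == n - 1) = true then PySem.List.pyRepeat ['#'] n
     else ['#'] ++ PySem.List.pyRepeat [' '] (n - 2) ++ ['#'])[k]'h =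
    (if (j = 0 ∨ j = n.toNat - 1) ∨ (k = 0 ∨ k = n.toNat - 1) then '#' else ' ') := by
  by_cases hb : ((j : Int) == 0 || (j : Int) == n - 1) = true
  · have hjb : j = 0 ∨ j = n.toNat - 1 := by
      simp only [beq_iff_eq, Bool.or_eq_true] at hb; omega
    simp only [hb]
    rw [if_pos (Or.inl hjb)]
    simp [PySem.List.pyRepeat_singleton]
  · have hjb : ¬ (j = 0 ∨ j = n.toNat - 1) := by
      simp only [beq_iff_eq, Bool.or_eq_true] at hb; push_neg at hb ⊢
      constructor <;> omega
    have hm2 : 2 ≤ n.toNat := by omega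
    simp only [eq_false_of_ne_true hb, Bool.false_eq_true, if_false] at h ⊢
    simp only [PySem.List.pyRepeat_singleton] at h ⊢
    -- ['#'] ++ X ++ ['#'] is definitionally '#' :: (X ++ ['#'])
    show ('#' :: (List.replicate (n - 2).toNat ' ' ++ ['#']))[k]'(by simpa using h) = _
    by_cases hk0 : k = 0
    · subst hk0
      rw [if_pos (Or.inr (Or.inl rfl))]
      exact List.getElem_cons_zero _ _ _
    · rw [List.getElem_cons]
      rw [dif_neg hk0]
      by_cases hkl : k = n.toNat - 1
      · rw [if_pos (Or.inr (Or.inr hkl))]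
        rw [List.getElem_append_right (by simp; omega)]
        simp
      · rw [if_neg (by tauto)]
        rw [List.getElem_append_left (by simp; omega)]
        exact List.getElem_replicate _

-- the final grid, row by row, equals A's rows
lemma pvGrid_eq (n : Int) (hn : 1 ≤ n) :
    ((PySem.List.pyRange 0 n 1).foldl (pvPaint n.toNat)
        (List.replicate n.toNat (List.replicate n.toNat ' '))).map (fun row => String.ofList row) =
      (PySem.List.pyRange 0 n 1).map (fun i =>
        if i == 0 || i == n - 1 then String.ofList (PySem.List.pyRepeat ['#'] n)
        else String.ofList (['#'] ++ PySem.List.pyRepeat [' '] (n - 2) ++ ['#'])) := by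
  set m := n.toNat with hm
  have hm1 : 1 ≤ m := by omega
  have hg0 : pvShape m (List.replicate m (List.replicate m ' ')) := by
    constructor
    · simp
    · intro r hrm; have := List.eq_of_mem_replicate hrm; subst this; simp
  have hlb : ∀ t ∈ PySem.List.pyRange 0 n 1, 0 ≤ t ∧ t < (m : Int) := by
    intro t ht; rw [PySem.List.mem_pyRange_one] at ht; omega
  set G := (PySem.List.pyRange 0 n 1).foldl (pvPaint m)
      (List.replicate m (List.replicate m ' ')) with hG
  have shG : pvShape m G := pvShape_foldl _ _ hg0
  have hlen : ((PySem.List.pyRange 0 n 1) : List Int).length = m := by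
    rw [PySem.List.length_pyRange_one]; omega
  apply List.ext_getElem
  · simp [shG.1, hlen]
  intro j h1 h2
  rw [List.getElem_map, List.getElem_map]
  have hjm : j < m := by simpa [shG.1] using h1
  have hjG : j < G.length := by rw [shG.1]; exact hjm
  have hjr : j < ((PySem.List.pyRange 0 n 1) : List Int).length := by rw [hlen]; exact hjm
  have hidx : ((PySem.List.pyRange 0 n 1) : List Int)[j]'hjr = (j : Int) := by
    rw [PySem.List.getElem_pyRange_one]; omega
  simp only [hidx]
  rw [← apply_ite String.ofList]
  apply congrArg String.ofList
  have hrow : (G[j]'hjG).length = m := shG.2 _ (List.getElem_mem hjG)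
  apply List.ext_getElem
  · rw [hrow, pvA_row_len n hn j hjm]
  intro k hk1 hk2
  have hkm : k < m := by rw [hrow] at hk1; exact hk1
  have hkmem : (k : Int) ∈ PySem.List.pyRange 0 n 1 := by
    rw [PySem.List.mem_pyRange_one]; omega
  have hjmem : (j : Int) ∈ PySem.List.pyRange 0 n 1 := by
    rw [PySem.List.mem_pyRange_one]; omega
  have cellv := pvCell_foldl hm1 (PySem.List.pyRange 0 n 1) hlb _ hg0 j k hjm hkm
  rw [← hG] at cellv
  have hGjk : (G[j]'hjG)[k]'hk1 = pvCell G j k := by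
    unfold pvCell
    rw [List.getD_eq_getElem _ _ hjG, List.getD_eq_getElem _ _ hk1]
  have base : pvCell (List.replicate m (List.replicate m ' ')) j k = ' ' := by
    unfold pvCell
    have hgd : (List.replicate m (List.replicate m ' ')).getD j [] = List.replicate m ' ' := by
      rw [List.getD_eq_getElem _ _ (by simpa using hjm)]
      exact List.getElem_replicate _
    rw [hgd, List.getD_eq_getElem _ _ (by simpa using hkm)]
    exact List.getElem_replicate _
  rw [hGjk, cellv, base, pvA_row_char n hn j k hjm hkm hk2]
  simp only [hkmem, hjmem, and_true]
  rfl

-- ===== VERDICT (by name: the statement is the Claim_ definition above) =====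
theorem create_square_spec : Claim_equal_create_square := by
  intro length _
  unfold Spec_create_square create_square create_square_alt
  match length with
  | none => rfl
  | some n =>
    by_cases h : n < 1
    · simp [h]
    · simp only [h, if_false]
      have hn : 1 ≤ n := by omega
      rw [pvA_rows n, pvGrid_eq n hn]
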